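-- pv_equiv track=rewrite | github.com/dtian09/Python-tools-to-analyse-genetic-data | selectfeatures.py | count_freq_of_features
-- ===== SOURCE A (Python) =====
-- def count_freq_of_features(dataL,has_id_col,has_class_attr):
-- 	#input: a list with each element a line of the data file
-- 	#	has id col (0 or 1)
-- 	#	has_class_attr (0 or 1)
-- 	#output: hash table (key=feature, value=frequency of feature)
-- 	#initialize a hash table
-- 	freq = {}
-- 	features = dataL[0]
-- 	featuresL = features.split(",")
-- 	if has_class_attr == '0':#no class attribute
-- 		if has_id_col == '0':#no id field
-- 			featuresL2 = featuresL
-- 		else: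
-- 			featuresL2 = featuresL[1:len(featuresL)]#skip the id field
-- 		for f in featuresL2:
-- 			freq[f]=0
-- 	else:#has class attribute
-- 		if has_id_col == '0':#no id field
-- 			featuresL2 = featuresL
-- 		else:
-- 			featuresL2 = featuresL[1:len(featuresL)-1]#skip the id field and the class attribute
-- 		for f in featuresL2:
-- 			freq[f]=0
-- 	#insert frequencies into hash table
-- 	if has_class_attr == '0':#no class attribute
-- 		for line in dataL[1:len(dataL)]:#skip the first line
-- 			valsL = line.split(",")
-- 			i=0
-- 			if has_id_col == '0':#no id field
-- 				valsL2 = valsL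
-- 			else:
-- 				valsL2 = valsL[1:len(valsL)]#skip the id
-- 			for f in featuresL2:
-- 				freq[f] += int(valsL2[i])
-- 				i+=1
-- 	else:#has class attribute
-- 		for line in dataL[1:len(dataL)]:#skip the first line
-- 			line = line.rstrip(",") #remove the last ','
-- 			valsL = line.split(",")
-- 			i=0
-- 			if has_id_col == '0':#no id field
-- 				valsL2 = valsL[0:len(valsL)-1]#skip the class attribute
-- 			else:
-- 				valsL2 = valsL[1:len(valsL)-1]#skip the id and the class attribute
-- 			for f in featuresL2:
-- 				freq[f] += int(valsL2[i])
-- 				i+=1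
-- 	return (freq,featuresL2)
-- ===== SOURCE B (Python) =====
-- def count_freq_of_features(dataL, has_id_col, has_class_attr):
--     # Column-major re-implementation: parse the header once, slice each data
--     # row once, then sum each feature column independently.
--     headerL = dataL[0].split(",")
--     if has_class_attr == '0':
--         featuresL2 = headerL if has_id_col == '0' else headerL[1:]
--     else:
--         featuresL2 = headerL if has_id_col == '0' else headerL[1:-1]
--     rows = []
--     for line in dataL[1:]:
--         if has_class_attr == '0':
--             valsL = line.split(",")
--             rows.append(valsL if has_id_col == '0' else valsL[1:])
--         else:
--             valsL = line.rstrip(",").split(",")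
--             rows.append(valsL[:-1] if has_id_col == '0' else valsL[1:-1])
--     freq = {f: 0 for f in featuresL2}
--     for j, f in enumerate(featuresL2):
--         freq[f] += sum(int(r[j]) for r in rows)
--     return (freq, featuresL2)
-- ===== Notes on version B (the rewrite author's own statement) =====
-- stated objective: alternative
-- what changed: A scans row-major, incrementing every feature's running count once per data row; B slices each row once, then computes the result column-major as one independent sum per feature column, building the dict in header order.
-- outside the precondition, e.g. on count_freq_of_features([], '0', '0'): A raises IndexError, B raises IndexError; on count_freq_of_features(['a,b', '1'], '0', '0'): A raises IndexError, B raises IndexError; on count_freq_of_features(['a', 'x'], '0', '0'): A raises ValueError, B raises ValueError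
import Mathlib
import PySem

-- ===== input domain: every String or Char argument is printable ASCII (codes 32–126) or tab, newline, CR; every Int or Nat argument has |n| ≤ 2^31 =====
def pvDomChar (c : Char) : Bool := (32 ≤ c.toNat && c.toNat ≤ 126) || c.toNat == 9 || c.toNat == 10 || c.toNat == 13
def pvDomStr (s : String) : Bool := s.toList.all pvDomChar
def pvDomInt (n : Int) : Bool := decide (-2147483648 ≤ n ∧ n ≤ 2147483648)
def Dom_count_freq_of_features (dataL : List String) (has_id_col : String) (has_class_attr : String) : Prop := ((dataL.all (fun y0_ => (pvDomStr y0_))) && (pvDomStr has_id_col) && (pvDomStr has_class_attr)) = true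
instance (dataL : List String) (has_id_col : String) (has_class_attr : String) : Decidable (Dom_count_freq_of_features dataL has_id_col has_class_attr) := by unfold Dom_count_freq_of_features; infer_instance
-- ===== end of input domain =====

-- B replaces A's row-scan-and-increment with a column-major pass (one summation per
-- feature column); same return value, objective: alternative decomposition, not speed.

-- shared PySem spellings of Python built-ins used by both sources
-- s.rstrip(","): removes every trailing ',' — exact hand port (PySem has no per-char rstrip)
def rstripComma (s : String) : String := String.ofList ((s.toList.reverse.dropWhile (fun c => c == ',')).reverse)
-- s.split(","): the separator is non-empty, so split? is always `some`
def pySplitC (s : String) : List String := (PySem.Str.split? s ",").getD []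
-- int(r[i]); both getD defaults are unreachable under Pre_ (IndexError / ValueError excluded)
def cellInt (r : List String) (i : Int) : Int := (PySem.Int.ofStr? ((PySem.List.pyGet? r i).getD "")).getD 0

-- ===== PORT A =====
def count_freq_of_features (dataL : List String) (has_id_col : String) (has_class_attr : String) : (List (String × Int)) × List String :=
  let freq : PySem.Dict String Int := PySem.Dict.empty
  let features := (PySem.List.pyGet? dataL 0).getD ""   -- dataL[0]; none = IndexError, outside Pre_
  let featuresL := pySplitC features
  -- first if/else: choose featuresL2 and initialise every frequency to 0
  let fr2 : PySem.Dict String Int × List String :=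
    if has_class_attr == "0" then
      let featuresL2 := if has_id_col == "0" then featuresL
        else PySem.List.slice featuresL (some 1) (some (featuresL.length : Int))
      (featuresL2.foldl (fun d f => d.insert f 0) freq, featuresL2)
    else
      let featuresL2 := if has_id_col == "0" then featuresL
        else PySem.List.slice featuresL (some 1) (some ((featuresL.length : Int) - 1))
      (featuresL2.foldl (fun d f => d.insert f 0) freq, featuresL2)
  let freq := fr2.1
  let featuresL2 := fr2.2
  -- second if/else: walk the data rows, adding each value to its feature's count
  let freq :=
    if has_class_attr == "0" then
      (PySem.List.slice dataL (some 1) (some (dataL.length : Int))).foldl (fun d line =>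
        let valsL := pySplitC line
        let valsL2 := if has_id_col == "0" then valsL
          else PySem.List.slice valsL (some 1) (some (valsL.length : Int))
        (featuresL2.foldl (fun (p : PySem.Dict String Int × Int) f =>
            (p.1.modify f 0 (· + cellInt valsL2 p.2), p.2 + 1)) (d, (0:Int))).1) freq
    else
      (PySem.List.slice dataL (some 1) (some (dataL.length : Int))).foldl (fun d line =>
        let line := rstripComma line
        let valsL := pySplitC line
        let valsL2 := if has_id_col == "0" then PySem.List.slice valsL (some 0) (some ((valsL.length : Int) - 1))
          else PySem.List.slice valsL (some 1) (some ((valsL.length : Int) - 1))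
        (featuresL2.foldl (fun (p : PySem.Dict String Int × Int) f =>
            (p.1.modify f 0 (· + cellInt valsL2 p.2), p.2 + 1)) (d, (0:Int))).1) freq
  (freq.items, featuresL2)

-- ===== PORT B =====
def count_freq_of_features_alt (dataL : List String) (has_id_col : String) (has_class_attr : String) : (List (String × Int)) × List String :=
  let headerL := pySplitC ((PySem.List.pyGet? dataL 0).getD "")
  let featuresL2 :=
    if has_class_attr == "0" then
      (if has_id_col == "0" then headerL else PySem.List.slice headerL (some 1) none)
    else
      (if has_id_col == "0" then headerL else PySem.List.slice headerL (some 1) (some (-1)))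
  let rows := (PySem.List.slice dataL (some 1) none).map (fun line =>
    if has_class_attr == "0" then
      let valsL := pySplitC line
      if has_id_col == "0" then valsL else PySem.List.slice valsL (some 1) none
    else
      let valsL := pySplitC (rstripComma line)
      if has_id_col == "0" then PySem.List.slice valsL none (some (-1))
      else PySem.List.slice valsL (some 1) (some (-1)))
  let freq0 := featuresL2.foldl (fun d f => d.insert f 0) PySem.Dict.empty
  let freq := (PySem.List.enumerate featuresL2 0).foldl (fun d jf =>
    d.modify jf.2 0 (· + rows.foldl (fun a r => a + cellInt r jf.1) 0)) freq0
  (freq.items, featuresL2)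

-- ===== PRECONDITION & SPEC =====
-- the feature list / the sliced value row, as the data format dictates (used only by Pre_)
def preFeat (dataL : List String) (has_id_col : String) (has_class_attr : String) : List String :=
  let fl := pySplitC ((PySem.List.pyGet? dataL 0).getD "")
  if has_class_attr == "0" then (if has_id_col == "0" then fl else fl.tail)
  else (if has_id_col == "0" then fl else fl.tail.dropLast)
def preVals (line : String) (has_id_col : String) (has_class_attr : String) : List String :=
  if has_class_attr == "0" then
    (if has_id_col == "0" then pySplitC line else (pySplitC line).tail)
  else
    (if has_id_col == "0" then (pySplitC (rstripComma line)).dropLast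
     else (pySplitC (rstripComma line)).tail.dropLast)
-- Pre_ excludes exactly the inputs where the Python A raises: an empty dataL (IndexError on
-- dataL[0]), a data row with fewer usable cells than there are features (IndexError), and a
-- needed cell that is not an int literal (ValueError).
def Pre_count_freq_of_features (dataL : List String) (has_id_col : String) (has_class_attr : String) : Prop :=
  dataL ≠ [] ∧ ∀ line ∈ dataL.tail,
    (preFeat dataL has_id_col has_class_attr).length ≤ (preVals line has_id_col has_class_attr).length ∧
    ∀ s ∈ (preVals line has_id_col has_class_attr).take (preFeat dataL has_id_col has_class_attr).length,
      (PySem.Int.ofStr? s).isSome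
instance (dataL : List String) (has_id_col : String) (has_class_attr : String) : Decidable (Pre_count_freq_of_features dataL has_id_col has_class_attr) := by unfold Pre_count_freq_of_features; infer_instance
def pvWitness_count_freq_of_features : List String × String × String :=
  (["id,a,b,class", "r1,1,2,x", "r2,3,-4,y"], "1", "1")
def Spec_count_freq_of_features (dataL : List String) (has_id_col : String) (has_class_attr : String) (out : (List (String × Int)) × List String) : Prop := out = count_freq_of_features_alt dataL has_id_col has_class_attr
instance (dataL : List String) (has_id_col : String) (has_class_attr : String) (out : (List (String × Int)) × List String) : Decidable (Spec_count_freq_of_features dataL has_id_col has_class_attr out) := by unfold Spec_count_freq_of_features; infer_instance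

-- ===== CLAIM (what is proved, stated in full; the proofs are below) =====
def Claim_equal_count_freq_of_features : Prop := ∀ (dataL : List String) (has_id_col : String) (has_class_attr : String), Dom_count_freq_of_features dataL has_id_col has_class_attr → Pre_count_freq_of_features dataL has_id_col has_class_attr → Spec_count_freq_of_features dataL has_id_col has_class_attr (count_freq_of_features dataL has_id_col has_class_attr)

-- ===== LEMMAS AND PROOFS =====

-- slice normalisations: A's explicit-length bounds equal B's open/negative bounds
theorem slice_one_len {α : Type} (xs : List α) :
    PySem.List.slice xs (some 1) (some (xs.length : Int)) = PySem.List.slice xs (some 1) none := by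
  simp only [PySem.List.slice, PySem.List.clampIdx]
  congr 1
  split_ifs <;> omega
theorem slice_one_pred {α : Type} (xs : List α) :
    PySem.List.slice xs (some 1) (some ((xs.length : Int) - 1)) = PySem.List.slice xs (some 1) (some (-1)) := by
  simp only [PySem.List.slice, PySem.List.clampIdx]
  congr 1
  split_ifs <;> omega
theorem slice_zero_pred {α : Type} (xs : List α) :
    PySem.List.slice xs (some 0) (some ((xs.length : Int) - 1)) = PySem.List.slice xs none (some (-1)) := by
  simp only [PySem.List.slice, PySem.List.clampIdx]
  have : PySem.List.clampIdx xs.length 0 = 0 := by simp [PySem.List.clampIdx]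
  congr 1
  split_ifs <;> omega

theorem foldl_counter_enum (F : List String) (step : PySem.Dict String Int → Int → String → PySem.Dict String Int)
    (d : PySem.Dict String Int) (i : Int) :
    (F.foldl (fun (p : PySem.Dict String Int × Int) f => (step p.1 p.2 f, p.2 + 1)) (d, i)).1
      = (PySem.List.enumerate F i).foldl (fun d jf => step d jf.1 jf.2) d := by
  induction F generalizing d i with
  | nil => simp [PySem.List.enumerate]
  | cons x xs ih => simp [PySem.List.enumerate_cons, List.foldl_cons, ih]
theorem keys_init_sub (F : List String) (d : PySem.Dict String Int) :
    ∀ k, k ∈ F ∨ k ∈ d.keys → k ∈ (F.foldl (fun d f => d.insert f 0) d).keys := by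
  induction F generalizing d with
  | nil => simp
  | cons x xs ih =>
    intro k hk
    simp only [List.foldl_cons]
    apply ih
    rcases hk with h | h
    · rcases List.mem_cons.1 h with h | h
      · right; exact (PySem.Dict.mem_keys_insert d x k 0).2 (Or.inl h)
      · left; exact h
    · right; exact (PySem.Dict.mem_keys_insert d x k 0).2 (Or.inr h)
theorem keys_init_nodup (F : List String) (d : PySem.Dict String Int) (h : d.keys.Nodup) :
    (F.foldl (fun d f => d.insert f 0) d).keys.Nodup := by
  induction F generalizing d with
  | nil => simpa
  | cons x xs ih => exact ih _ (PySem.Dict.nodup_keys_insert d x 0 h)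
theorem foldl_add_keys (L : List (String × Int)) (d : PySem.Dict String Int)
    (h : ∀ p ∈ L, p.1 ∈ d.keys) :
    (L.foldl (fun d (p : String × Int) => d.modify p.1 0 (· + p.2)) d).keys = d.keys := by
  induction L generalizing d with
  | nil => rfl
  | cons p L ih =>
    have hc : d.contains p.1 = true := (PySem.Dict.contains_iff_mem_keys d p.1).2 (h p (by simp))
    have hkeys : (d.modify p.1 0 (· + p.2)).keys = d.keys := by
      rw [PySem.Dict.keys_modify, PySem.Dict.keys_insert_of_contains _ _ hc]
    simp only [List.foldl_cons]
    rw [ih _ (fun q hq => by rw [hkeys]; exact h q (by simp [hq])), hkeys]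
theorem foldl_add_getD (L : List (String × Int)) (d : PySem.Dict String Int) (k : String) :
    (L.foldl (fun d (p : String × Int) => d.modify p.1 0 (· + p.2)) d).getD k 0
      = d.getD k 0 + (L.map (fun p => if p.1 = k then p.2 else 0)).sum := by
  induction L generalizing d with
  | nil => simp
  | cons p L ih =>
    simp only [List.foldl_cons, List.map_cons, List.sum_cons, ih]
    rw [PySem.Dict.getD_modify]
    by_cases hk : k = p.1
    · simp [hk]; ring
    · simp [hk, Ne.symm hk]
theorem dict_keys_eq_map (d : PySem.Dict String Int) : d.keys = d.items.map Prod.fst := by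
  cases d; rw [PySem.Dict.keys_mk]
theorem dict_ext_keys_get? (d1 d2 : PySem.Dict String Int) (hk : d1.keys = d2.keys)
    (hn : d1.keys.Nodup) (hg : ∀ k ∈ d1.keys, d1.get? k = d2.get? k) : d1 = d2 := by
  apply PySem.Dict.ext
  have hm : d1.items.map Prod.fst = d2.items.map Prod.fst := by
    rw [← dict_keys_eq_map, ← dict_keys_eq_map]; exact hk
  have hlen : d1.items.length = d2.items.length := by
    have := congrArg List.length hm; simpa using this
  apply List.ext_getElem hlen
  intro i h1 h2
  have hfst : (d1.items[i]).1 = (d2.items[i]).1 := by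
    have h : (d1.items.map Prod.fst)[i]'(by simpa using h1) = (d2.items.map Prod.fst)[i]'(by simpa using h2) := by
      simp only [hm]
    simpa using h
  have hmem1 : d1.items[i] ∈ d1.items := List.getElem_mem _
  have hmem2 : d2.items[i] ∈ d2.items := List.getElem_mem _
  have hn2 : d2.keys.Nodup := hk ▸ hn
  have g1 : d1.get? (d1.items[i]).1 = some (d1.items[i]).2 :=
    PySem.Dict.get?_of_mem_items d1 (by exact hmem1) hn
  have g2 : d2.get? (d2.items[i]).1 = some (d2.items[i]).2 :=
    PySem.Dict.get?_of_mem_items d2 (by exact hmem2) hn2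
  have hkmem : (d1.items[i]).1 ∈ d1.keys := by
    rw [dict_keys_eq_map]; exact List.mem_map_of_mem hmem1
  have := hg _ hkmem
  rw [g1, hfst, g2] at this
  have hsnd : (d1.items[i]).2 = (d2.items[i]).2 := by injection this
  exact Prod.ext hfst hsnd
theorem sum_map_swap {ρ ε : Type} (rows : List ρ) (E : List ε) (g : ρ → ε → Int) :
    (rows.map (fun r => (E.map (g r)).sum)).sum = (E.map (fun e => (rows.map (fun r => g r e)).sum)).sum := by
  induction rows with
  | nil => simp
  | cons r rows ih =>
    simp only [List.map_cons, List.sum_cons, ih, ← List.sum_map_add]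
theorem sum_flatMap' {ρ β : Type} (rows : List ρ) (g : ρ → List β) [AddCommMonoid β]
    : ((rows.flatMap g).sum : β) = (rows.map (fun r => (g r).sum)).sum := by
  induction rows with
  | nil => simp
  | cons r rows ih => simp [List.flatMap_cons, ih]
theorem mem_enumerate_snd {α : Type} (xs : List α) (i : Int) (p : Int × α) (h : p ∈ PySem.List.enumerate xs i) : p.2 ∈ xs := by
  induction xs generalizing i with
  | nil => simp [PySem.List.enumerate] at h
  | cons x t ih =>
    rw [PySem.List.enumerate_cons] at h
    rcases List.mem_cons.1 h with h | h
    · subst h; simp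
    · exact List.mem_cons_of_mem _ (ih _ h)
theorem main_exchange (F : List String) (rows : List (List String)) (v : List String → Int → Int) :
    rows.foldl (fun d r =>
        (F.foldl (fun (p : PySem.Dict String Int × Int) f => (p.1.modify f 0 (· + v r p.2), p.2 + 1)) (d, (0:Int))).1)
      (F.foldl (fun d f => d.insert f 0) PySem.Dict.empty)
    = (PySem.List.enumerate F 0).foldl (fun d jf =>
        d.modify jf.2 0 (· + rows.foldl (fun a r => a + v r jf.1) 0))
      (F.foldl (fun d f => d.insert f 0) PySem.Dict.empty) := by
  set d0 : PySem.Dict String Int := F.foldl (fun d f => d.insert f 0) PySem.Dict.empty with hd0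
  set E : List (Int × String) := PySem.List.enumerate F 0 with hE
  have hEF : ∀ p ∈ E, p.2 ∈ F := fun p hp => mem_enumerate_snd F 0 p hp
  -- A's side as a fold of pair-additions over a flat list
  have hA : rows.foldl (fun d r =>
        (F.foldl (fun (p : PySem.Dict String Int × Int) f => (p.1.modify f 0 (· + v r p.2), p.2 + 1)) (d, (0:Int))).1) d0
      = (rows.flatMap (fun r => E.map (fun jf => (jf.2, v r jf.1)))).foldl
          (fun d (p : String × Int) => d.modify p.1 0 (· + p.2)) d0 := by
    rw [List.foldl_flatMap]
    have hfun : (fun (d : PySem.Dict String Int) (r : List String) =>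
        (F.foldl (fun (p : PySem.Dict String Int × Int) f => (p.1.modify f 0 (· + v r p.2), p.2 + 1)) (d, (0:Int))).1)
        = fun d r => (E.map (fun jf => ((jf.2 : String), v r jf.1))).foldl
            (fun d (p : String × Int) => d.modify p.1 0 (· + p.2)) d := by
      funext d r
      rw [foldl_counter_enum F (fun d j f => d.modify f 0 (· + v r j)) d 0, List.foldl_map]
    rw [hfun]
  have hB : (E.foldl (fun d jf => d.modify jf.2 0 (· + rows.foldl (fun a r => a + v r jf.1) 0)) d0)
      = (E.map (fun jf => (jf.2, rows.foldl (fun a r => a + v r jf.1) 0))).foldl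
          (fun d (p : String × Int) => d.modify p.1 0 (· + p.2)) d0 := by
    rw [List.foldl_map]
  rw [hA, hB]
  set LA := rows.flatMap (fun r => E.map (fun jf => (jf.2, v r jf.1))) with hLA
  set LB := E.map (fun jf => (jf.2, rows.foldl (fun a r => a + v r jf.1) 0)) with hLB
  have hkeys0 : ∀ f ∈ F, f ∈ d0.keys := fun f hf => keys_init_sub F PySem.Dict.empty f (Or.inl hf)
  have hLAk : ∀ p ∈ LA, p.1 ∈ d0.keys := by
    intro p hp
    rw [hLA, List.mem_flatMap] at hp
    obtain ⟨r, _, hp⟩ := hp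
    obtain ⟨jf, hjf, rfl⟩ := List.mem_map.1 hp
    exact hkeys0 _ (hEF _ hjf)
  have hLBk : ∀ p ∈ LB, p.1 ∈ d0.keys := by
    intro p hp
    obtain ⟨jf, hjf, rfl⟩ := List.mem_map.1 hp
    exact hkeys0 _ (hEF _ hjf)
  have hnodup : d0.keys.Nodup := keys_init_nodup F _ (by simp [PySem.Dict.keys_empty])
  have hKA := foldl_add_keys LA d0 hLAk
  have hKB := foldl_add_keys LB d0 hLBk
  apply dict_ext_keys_get? _ _ (by rw [hKA, hKB]) (by rw [hKA]; exact hnodup)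
  intro k hkmem
  rw [hKA] at hkmem
  -- both contain k, so get? is determined by getD
  have hsum : (LA.map (fun p => if p.1 = k then p.2 else 0)).sum
      = (LB.map (fun p => if p.1 = k then p.2 else 0)).sum := by
    rw [hLA, List.map_flatMap, sum_flatMap', hLB, List.map_map]
    have : ∀ r, ((E.map (fun jf => ((jf.2 : String), v r jf.1))).map (fun p => if p.1 = k then p.2 else 0))
        = E.map (fun jf => if jf.2 = k then v r jf.1 else 0) := by
      intro r; rw [List.map_map]; rfl
    simp only [this]
    rw [sum_map_swap rows E (fun r jf => if jf.2 = k then v r jf.1 else 0)]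
    apply congrArg
    apply List.map_congr_left
    intro jf _
    show (rows.map (fun r => if jf.2 = k then v r jf.1 else 0)).sum
        = (if (jf.2, rows.foldl (fun a r => a + v r jf.1) 0).1 = k
            then (jf.2, rows.foldl (fun a r => a + v r jf.1) 0).2 else 0)
    by_cases hc : jf.2 = k
    · simp only [hc, if_true]
      rw [PySem.List.foldl_add rows (fun r => v r jf.1) 0, zero_add]
    · simp [hc]
  have hgd : (LA.foldl (fun d (p : String × Int) => d.modify p.1 0 (· + p.2)) d0).getD k 0
      = (LB.foldl (fun d (p : String × Int) => d.modify p.1 0 (· + p.2)) d0).getD k 0 := by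
    rw [foldl_add_getD, foldl_add_getD, hsum]
  -- lift getD equality to get? equality (k is contained in both)
  have hc1 : (LA.foldl (fun d (p : String × Int) => d.modify p.1 0 (· + p.2)) d0).contains k = true := by
    rw [PySem.Dict.contains_iff_mem_keys, hKA]; exact hkmem
  have hc2 : (LB.foldl (fun d (p : String × Int) => d.modify p.1 0 (· + p.2)) d0).contains k = true := by
    rw [PySem.Dict.contains_iff_mem_keys, hKB]; exact hkmem
  cases e1 : (LA.foldl (fun d (p : String × Int) => d.modify p.1 0 (· + p.2)) d0).get? k with
  | none => rw [PySem.Dict.get?_eq_none_iff_contains] at e1; rw [hc1] at e1; cases e1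
  | some v1 =>
    cases e2 : (LB.foldl (fun d (p : String × Int) => d.modify p.1 0 (· + p.2)) d0).get? k with
    | none => rw [PySem.Dict.get?_eq_none_iff_contains] at e2; rw [hc2] at e2; cases e2
    | some v2 =>
      rw [PySem.Dict.getD_eq_get?_getD, e1, PySem.Dict.getD_eq_get?_getD, e2] at hgd
      simpa using hgd

-- ===== VERDICT (by name: the statement is the Claim_ definition above) =====
theorem bridge (dataL : List String) (F : List String) (toVals : String → List String) :
    ((PySem.List.slice dataL (some 1) none).foldl (fun d line =>
        (F.foldl (fun (p : PySem.Dict String Int × Int) f =>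
          (p.1.modify f 0 (· + cellInt (toVals line) p.2), p.2 + 1)) (d, (0:Int))).1)
      (F.foldl (fun d f => d.insert f 0) PySem.Dict.empty))
    = (PySem.List.enumerate F 0).foldl (fun d jf =>
        d.modify jf.2 0 (· + ((PySem.List.slice dataL (some 1) none).map toVals).foldl
          (fun a r => a + cellInt r jf.1) 0))
      (F.foldl (fun d f => d.insert f 0) PySem.Dict.empty) := by
  have h := main_exchange F ((PySem.List.slice dataL (some 1) none).map toVals) cellInt
  rw [List.foldl_map] at h
  exact h

theorem count_freq_of_features_spec : Claim_equal_count_freq_of_features := by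
  intro dataL has_id_col has_class_attr _ _
  unfold Spec_count_freq_of_features count_freq_of_features count_freq_of_features_alt
  rcases eq_or_ne has_class_attr "0" with h1 | h1 <;> rcases eq_or_ne has_id_col "0" with h2 | h2
  · subst h1; subst h2
    simp only [BEq.rfl, if_true, slice_one_len]
    exact congrArg (fun d => (PySem.Dict.items d, pySplitC ((PySem.List.pyGet? dataL 0).getD "")))
      (bridge dataL _ (fun line => pySplitC line))
  · subst h1
    have e2 : (has_id_col == "0") = false := beq_eq_false_iff_ne.mpr h2
    simp only [BEq.rfl, e2, if_true, Bool.false_eq_true, if_false, slice_one_len]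
    exact congrArg (fun d => (PySem.Dict.items d,
        PySem.List.slice (pySplitC ((PySem.List.pyGet? dataL 0).getD "")) (some 1) none))
      (bridge dataL _ (fun line => PySem.List.slice (pySplitC line) (some 1) none))
  · subst h2
    have e1 : (has_class_attr == "0") = false := beq_eq_false_iff_ne.mpr h1
    simp only [BEq.rfl, e1, if_true, Bool.false_eq_true, if_false, slice_one_len,
      slice_zero_pred]
    exact congrArg (fun d => (PySem.Dict.items d, pySplitC ((PySem.List.pyGet? dataL 0).getD "")))
      (bridge dataL _ (fun line => PySem.List.slice (pySplitC (rstripComma line)) none (some (-1))))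
  · have e1 : (has_class_attr == "0") = false := beq_eq_false_iff_ne.mpr h1
    have e2 : (has_id_col == "0") = false := beq_eq_false_iff_ne.mpr h2
    simp only [e1, e2, Bool.false_eq_true, if_false, slice_one_len, slice_one_pred]
    exact congrArg (fun d => (PySem.Dict.items d,
        PySem.List.slice (pySplitC ((PySem.List.pyGet? dataL 0).getD "")) (some 1) (some (-1))))
      (bridge dataL _ (fun line => PySem.List.slice (pySplitC (rstripComma line)) (some 1) (some (-1))))
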